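-- pv_equiv track=rewrite | github.com/ccarballo50/anonim-meddocan | legacy/anonim_meddocan_real_1_FINAL3_Sobrefunciona.py | _apply_spans
-- ===== SOURCE A (Python) =====
-- def _apply_spans(text: str, spans, tag_map, masking_strategy="tag"):
--     """Reemplaza spans [ (start,end,label), ... ] en orden inverso."""
--     if not spans:
--         return text, {}
--     # ordenar y aplicar de derecha a izquierda
--     spans = sorted(spans, key=lambda x: x[0], reverse=True)
--     out = text
--     counts = {}
--     for s, e, lab in spans:
--         repl = tag_map.get(lab, f"[{lab}]") if masking_strategy == "tag" else "█"
--         out = out[:s] + repl + out[e:]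
--         counts[lab] = counts.get(lab, 0) + 1
--     return out, counts
-- ===== SOURCE B (Python) =====
-- def _clamp(i, n):
--     """Python slice-bound semantics: negative wraps once, then clamp to [0, n]."""
--     if i < 0:
--         i += n
--     return 0 if i < 0 else (n if i > n else i)
--
--
-- def _prefix(pieces, k):
--     """Pieces of the first k characters (k already clamped)."""
--     out = []
--     for src, lo, hi in pieces:
--         if k <= 0:
--             break
--         if k < hi - lo:
--             out.append((src, lo, lo + k))
--         else:
--             out.append((src, lo, hi))
--         k -= hi - lo
--     return out
--
--
-- def _suffix(pieces, k):
--     """Pieces from character k on (k already clamped)."""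
--     out = []
--     for src, lo, hi in pieces:
--         if k <= 0:
--             out.append((src, lo, hi))
--         else:
--             if k < hi - lo:
--                 out.append((src, lo + k, hi))
--             k -= hi - lo
--     return out
--
--
-- def _apply_spans(text: str, spans, tag_map, masking_strategy="tag"):
--     """Piece table: splice offset-pieces instead of rebuilding the string per span."""
--     if not spans:
--         return text, {}
--     pieces = [(text, 0, len(text))]
--     length = len(text)
--     counts = {}
--     for s, e, lab in sorted(spans, key=lambda x: x[0], reverse=True):
--         repl = tag_map.get(lab, f"[{lab}]") if masking_strategy == "tag" else "\u2588"
--         i = _clamp(s, length)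
--         j = _clamp(e, length)
--         pieces = _prefix(pieces, i) + [(repl, 0, len(repl))] + _suffix(pieces, j)
--         length = i + len(repl) + (length - j)
--         counts[lab] = counts.get(lab, 0) + 1
--     return "".join(src[lo:hi] for src, lo, hi in pieces), counts
-- ===== Notes on version B (the rewrite author's own statement) =====
-- stated objective: faster
-- what changed: A rebuilds the entire string with out[:s]+repl+out[e:] once per span; B keeps the text as a piece table of (source, lo, hi) offset pieces, splices pieces per span with O(1)-size slice bookkeeping, and joins once at the end.
import Mathlib
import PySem

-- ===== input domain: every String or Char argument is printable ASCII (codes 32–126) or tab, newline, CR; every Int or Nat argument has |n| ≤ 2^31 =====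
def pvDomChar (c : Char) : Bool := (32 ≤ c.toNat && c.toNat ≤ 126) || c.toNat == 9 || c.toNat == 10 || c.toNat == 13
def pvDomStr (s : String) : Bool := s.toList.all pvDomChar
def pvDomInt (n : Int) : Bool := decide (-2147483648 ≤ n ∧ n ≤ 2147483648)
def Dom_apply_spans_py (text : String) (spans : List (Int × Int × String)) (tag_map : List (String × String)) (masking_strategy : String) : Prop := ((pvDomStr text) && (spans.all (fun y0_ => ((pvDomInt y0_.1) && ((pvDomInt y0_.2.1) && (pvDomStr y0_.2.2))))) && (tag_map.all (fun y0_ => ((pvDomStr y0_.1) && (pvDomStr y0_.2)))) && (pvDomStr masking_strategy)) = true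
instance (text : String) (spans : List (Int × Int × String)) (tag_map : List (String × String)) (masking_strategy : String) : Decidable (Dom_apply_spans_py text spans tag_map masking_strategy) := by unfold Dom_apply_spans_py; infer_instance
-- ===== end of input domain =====

-- B replaces A's per-span rebuild of the whole string by a piece table of (source, lo, hi)
-- offset pieces spliced per span and joined once at the end, avoiding the O(n) copy per span.

-- ===== PORT A =====
-- repl = tag_map.get(lab, f"[{lab}]") if masking_strategy == "tag" else "█"   (dict.get = first match)
def pvRepl (tag_map : List (String × String)) (masking_strategy : String) (lab : String) : List Char :=
  if masking_strategy = "tag" then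
    match tag_map.find? (fun p => p.1 == lab) with
    | some p => p.2.toList
    | none => '[' :: (lab.toList ++ [']'])
  else ['█']

def apply_spans_py (text : String) (spans : List (Int × Int × String)) (tag_map : List (String × String)) (masking_strategy : String) : String × (List (String × Int)) :=
  if spans = [] then (text, [])
  else
    -- spans = sorted(spans, key=lambda x: x[0], reverse=True); then one loop updating (out, counts)
    let sspans := PySem.List.sorted spans (fun x => x.1) true
    let res := sspans.foldl
      (fun (st : List Char × PySem.Dict String Int) sp =>
        (PySem.List.slice st.1 none (some sp.1) ++ pvRepl tag_map masking_strategy sp.2.2 ++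
           PySem.List.slice st.1 (some sp.2.1) none,
         st.2.insert sp.2.2 (st.2.getD sp.2.2 0 + 1)))
      (text.toList, PySem.Dict.empty)
    (String.ofList res.1, res.2.items)

-- ===== PORT B =====
-- _clamp(i, n): Python slice-bound semantics (negative wraps once, then clamp to [0, n])
def pvClamp (i n : Int) : Int :=
  if (if i < 0 then i + n else i) < 0 then 0
  else if (if i < 0 then i + n else i) > n then n
  else (if i < 0 then i + n else i)

-- _prefix(pieces, k): pieces of the first k characters; a piece is (src, lo, hi)
def pvPrefix : List (List Char × Int × Int) → Int → List (List Char × Int × Int)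
  | [], _ => []
  | p :: ps, k =>
    if k ≤ 0 then []
    else (if k < p.2.2 - p.2.1 then (p.1, p.2.1, p.2.1 + k) else p) :: pvPrefix ps (k - (p.2.2 - p.2.1))

-- _suffix(pieces, k): pieces from character k on
def pvSuffix : List (List Char × Int × Int) → Int → List (List Char × Int × Int)
  | [], _ => []
  | p :: ps, k =>
    if k ≤ 0 then p :: pvSuffix ps k
    else (if k < p.2.2 - p.2.1 then [(p.1, p.2.1 + k, p.2.2)] else []) ++ pvSuffix ps (k - (p.2.2 - p.2.1))

def apply_spans_py_alt (text : String) (spans : List (Int × Int × String)) (tag_map : List (String × String)) (masking_strategy : String) : String × (List (String × Int)) :=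
  if spans = [] then (text, [])
  else
    let sspans := PySem.List.sorted spans (fun x => x.1) true
    let res := sspans.foldl
      (fun (st : (List (List Char × Int × Int) × Int) × PySem.Dict String Int) sp =>
        ((pvPrefix st.1.1 (pvClamp sp.1 st.1.2) ++
            [(pvRepl tag_map masking_strategy sp.2.2, 0,
              ((pvRepl tag_map masking_strategy sp.2.2).length : Int))] ++
            pvSuffix st.1.1 (pvClamp sp.2.1 st.1.2),
          pvClamp sp.1 st.1.2 + ((pvRepl tag_map masking_strategy sp.2.2).length : Int) +
            (st.1.2 - pvClamp sp.2.1 st.1.2)),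
         st.2.insert sp.2.2 (st.2.getD sp.2.2 0 + 1)))
      (([(text.toList, 0, (text.toList.length : Int))], (text.toList.length : Int)), PySem.Dict.empty)
    (String.ofList
        ((res.1.1.map (fun p => PySem.List.slice p.1 (some p.2.1) (some p.2.2))).flatten),
      res.2.items)

-- ===== PRECONDITION & SPEC =====
def Spec_apply_spans_py (text : String) (spans : List (Int × Int × String)) (tag_map : List (String × String)) (masking_strategy : String) (out : String × (List (String × Int))) : Prop := out = apply_spans_py_alt text spans tag_map masking_strategy
instance (text : String) (spans : List (Int × Int × String)) (tag_map : List (String × String)) (masking_strategy : String) (out : String × (List (String × Int))) : Decidable (Spec_apply_spans_py text spans tag_map masking_strategy out) := by unfold Spec_apply_spans_py; infer_instance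

-- ===== CLAIM (what is proved, stated in full; the proofs are below) =====
def Claim_equal_apply_spans_py : Prop := ∀ (text : String) (spans : List (Int × Int × String)) (tag_map : List (String × String)) (masking_strategy : String), Dom_apply_spans_py text spans tag_map masking_strategy → Spec_apply_spans_py text spans tag_map masking_strategy (apply_spans_py text spans tag_map masking_strategy)

-- ===== LEMMAS AND PROOFS =====

-- the characters a piece denotes
def pvVal (p : List Char × Int × Int) : List Char :=
  PySem.List.slice p.1 (some p.2.1) (some p.2.2)

-- well-formed piece: offsets in range
def pvWf (p : List Char × Int × Int) : Prop :=
  0 ≤ p.2.1 ∧ p.2.1 ≤ p.2.2 ∧ p.2.2 ≤ (p.1.length : Int)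

lemma pvWf_mk (src : List Char) (a b : Int) (h1 : 0 ≤ a) (h2 : a ≤ b)
    (h3 : b ≤ (src.length : Int)) : pvWf (src, a, b) :=
  ⟨h1, h2, h3⟩

lemma pv_slice_none_some {α : Type} (xs : List α) (b : Int) :
    PySem.List.slice xs none (some b) = xs.take (PySem.List.clampIdx xs.length b) := by
  simp [PySem.List.slice]

lemma pvVal_eq (p : List Char × Int × Int) (h : pvWf p) :
    pvVal p = (p.1.drop p.2.1.toNat).take (p.2.2.toNat - p.2.1.toNat) := by
  obtain ⟨h1, h2, h3⟩ := h
  exact PySem.List.slice_toNat p.1 h1 (le_trans h1 h2)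

lemma pvVal_length (p : List Char × Int × Int) (h : pvWf p) :
    (pvVal p).length = (p.2.2 - p.2.1).toNat := by
  obtain ⟨h1, h2, h3⟩ := h
  rw [pvVal_eq p ⟨h1, h2, h3⟩]
  simp [List.length_take, List.length_drop]
  omega

lemma pvVal_mk (src : List Char) (a b : Int) (h1 : 0 ≤ a) (h2 : a ≤ b)
    (h3 : b ≤ (src.length : Int)) :
    pvVal (src, a, b) = (src.drop a.toNat).take (b.toNat - a.toNat) :=
  pvVal_eq (src, a, b) (pvWf_mk src a b h1 h2 h3)

lemma pvClamp_toNat (i : Int) (n : Nat) :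
    (pvClamp i (n : Int)).toNat = PySem.List.clampIdx n i := by
  unfold pvClamp PySem.List.clampIdx
  split_ifs <;> omega

lemma pvClamp_nonneg (i n : Int) (hn : 0 ≤ n) : 0 ≤ pvClamp i n := by
  unfold pvClamp; split_ifs <;> omega

lemma pvPrefix_nonpos (ps : List (List Char × Int × Int)) (k : Int) (hk : k ≤ 0) :
    pvPrefix ps k = [] := by
  cases ps with
  | nil => rfl
  | cons p ps => simp [pvPrefix, hk]

lemma pvSuffix_nonpos (ps : List (List Char × Int × Int)) (k : Int) (hk : k ≤ 0) :
    pvSuffix ps k = ps := by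
  induction ps with
  | nil => rfl
  | cons p ps ih => simp [pvSuffix, hk, ih]

lemma pvPrefix_wf (ps : List (List Char × Int × Int)) :
    ∀ (k : Int), (∀ p ∈ ps, pvWf p) → ∀ q ∈ pvPrefix ps k, pvWf q := by
  induction ps with
  | nil => intro k _ q hq; simp [pvPrefix] at hq
  | cons p ps ih =>
    intro k hwf q hq
    have hp := hwf p (by simp)
    by_cases hk : k ≤ 0
    · simp [pvPrefix, hk] at hq
    · simp only [pvPrefix, if_neg hk, List.mem_cons] at hq
      rcases hq with hq | hq
      · subst hq
        split_ifs with h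
        · obtain ⟨w1, w2, w3⟩ := hp
          exact pvWf_mk _ _ _ w1 (by omega) (by omega)
        · exact hp
      · exact ih _ (fun r hr => hwf r (by simp [hr])) q hq

lemma pvSuffix_wf (ps : List (List Char × Int × Int)) :
    ∀ (k : Int), (∀ p ∈ ps, pvWf p) → ∀ q ∈ pvSuffix ps k, pvWf q := by
  induction ps with
  | nil => intro k _ q hq; simp [pvSuffix] at hq
  | cons p ps ih =>
    intro k hwf q hq
    have hp := hwf p (by simp)
    have hrest : ∀ r ∈ ps, pvWf r := fun r hr => hwf r (by simp [hr])
    by_cases hk : k ≤ 0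
    · simp only [pvSuffix, if_pos hk, List.mem_cons] at hq
      rcases hq with hq | hq
      · subst hq; exact hp
      · exact ih _ hrest q hq
    · simp only [pvSuffix, if_neg hk, List.mem_append] at hq
      rcases hq with hq | hq
      · split_ifs at hq with h
        · simp at hq; subst hq
          obtain ⟨w1, w2, w3⟩ := hp
          exact pvWf_mk _ _ _ (by omega) (by omega) w3
        · simp at hq
      · exact ih _ hrest q hq

lemma pvPrefix_flatten (ps : List (List Char × Int × Int)) :
    ∀ (k : Int), (∀ p ∈ ps, pvWf p) →
      ((pvPrefix ps k).map pvVal).flatten = ((ps.map pvVal).flatten).take k.toNat := by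
  induction ps with
  | nil => intro k _; simp [pvPrefix]
  | cons p ps ih =>
    intro k hwf
    have hp := hwf p (by simp)
    obtain ⟨w1, w2, w3⟩ := hp
    have hp : pvWf p := ⟨w1, w2, w3⟩
    have hrest : ∀ r ∈ ps, pvWf r := fun r hr => hwf r (by simp [hr])
    have hlen : (pvVal p).length = (p.2.2 - p.2.1).toNat := pvVal_length p hp
    by_cases hk : k ≤ 0
    · rw [pvPrefix_nonpos _ _ hk, show k.toNat = 0 from by omega]
      simp
    · simp only [pvPrefix, if_neg hk, List.map_cons, List.flatten_cons]
      split_ifs with h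
      · -- k < hi - lo : cut inside this piece, rest of the walk is empty
        rw [pvPrefix_nonpos _ _ (by omega)]
        simp only [List.map_nil, List.flatten_nil, List.append_nil, List.take_append]
        rw [show k.toNat - (pvVal p).length = 0 from by omega, List.take_zero,
          List.append_nil]
        rw [pvVal_mk p.1 p.2.1 (p.2.1 + k) w1 (by omega) (by omega), pvVal_eq p hp,
          List.take_take]
        congr 1
        omega
      · -- k ≥ hi - lo : whole piece kept, recurse
        rw [ih _ hrest, List.take_append, List.take_of_length_le (l := pvVal p) (by omega),
          show k.toNat - (pvVal p).length = (k - (p.2.2 - p.2.1)).toNat from by omega]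

lemma pvSuffix_flatten (ps : List (List Char × Int × Int)) :
    ∀ (k : Int), (∀ p ∈ ps, pvWf p) →
      ((pvSuffix ps k).map pvVal).flatten = ((ps.map pvVal).flatten).drop k.toNat := by
  induction ps with
  | nil => intro k _; simp [pvSuffix]
  | cons p ps ih =>
    intro k hwf
    have hp := hwf p (by simp)
    obtain ⟨w1, w2, w3⟩ := hp
    have hp : pvWf p := ⟨w1, w2, w3⟩
    have hrest : ∀ r ∈ ps, pvWf r := fun r hr => hwf r (by simp [hr])
    have hlen : (pvVal p).length = (p.2.2 - p.2.1).toNat := pvVal_length p hp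
    by_cases hk : k ≤ 0
    · simp only [pvSuffix, if_pos hk, List.map_cons, List.flatten_cons]
      rw [ih _ hrest, show k.toNat = 0 from by omega]
      simp
    · simp only [pvSuffix, if_neg hk]
      split_ifs with h
      · -- cut inside this piece
        rw [pvSuffix_nonpos _ _ (by omega)]
        simp only [List.map_append, List.map_cons, List.map_nil, List.flatten_append,
          List.flatten_cons, List.flatten_nil, List.append_nil, List.drop_append]
        rw [show k.toNat - (pvVal p).length = 0 from by omega, List.drop_zero]
        congr 1
        rw [pvVal_mk p.1 (p.2.1 + k) p.2.2 (by omega) (by omega) w3, pvVal_eq p hp,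
          List.drop_take, List.drop_drop,
          show (p.2.1 + k).toNat = p.2.1.toNat + k.toNat from by omega,
          show p.2.2.toNat - (p.2.1.toNat + k.toNat)
              = p.2.2.toNat - p.2.1.toNat - k.toNat from by omega]
      · -- whole piece dropped
        simp only [List.nil_append, List.map_cons, List.flatten_cons]
        rw [ih _ hrest, List.drop_append, List.drop_of_length_le (l := pvVal p) (by omega),
          show k.toNat - (pvVal p).length = (k - (p.2.2 - p.2.1)).toNat from by omega,
          List.nil_append]

-- the splice invariant: B's pieces always flatten to A's current string, and B's tracked
-- length is that string's length
lemma pv_fold_inv (tm : List (String × String)) (ms : String) :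
    ∀ (l : List (Int × Int × String)) (out : List Char)
      (ps : List (List Char × Int × Int)) (L : Int),
      (∀ p ∈ ps, pvWf p) → ((ps.map pvVal).flatten = out) → (L = (out.length : Int)) →
      (∀ q ∈ (l.foldl (fun (st : List (List Char × Int × Int) × Int) sp =>
            (pvPrefix st.1 (pvClamp sp.1 st.2) ++
              [(pvRepl tm ms sp.2.2, 0, ((pvRepl tm ms sp.2.2).length : Int))] ++
              pvSuffix st.1 (pvClamp sp.2.1 st.2),
             pvClamp sp.1 st.2 + ((pvRepl tm ms sp.2.2).length : Int) +
               (st.2 - pvClamp sp.2.1 st.2))) (ps, L)).1, pvWf q) ∧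
      (((l.foldl (fun (st : List (List Char × Int × Int) × Int) sp =>
            (pvPrefix st.1 (pvClamp sp.1 st.2) ++
              [(pvRepl tm ms sp.2.2, 0, ((pvRepl tm ms sp.2.2).length : Int))] ++
              pvSuffix st.1 (pvClamp sp.2.1 st.2),
             pvClamp sp.1 st.2 + ((pvRepl tm ms sp.2.2).length : Int) +
               (st.2 - pvClamp sp.2.1 st.2))) (ps, L)).1.map pvVal).flatten
        = l.foldl (fun acc sp =>
            PySem.List.slice acc none (some sp.1) ++ pvRepl tm ms sp.2.2 ++
              PySem.List.slice acc (some sp.2.1) none) out) := by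
  intro l
  induction l with
  | nil =>
    intro out ps L hwf hflat _
    exact ⟨hwf, hflat⟩
  | cons sp rest ih =>
    intro out ps L hwf hflat hL
    simp only [List.foldl_cons]
    have hL0 : (0:Int) ≤ L := by omega
    -- the two clamped cut points agree with PySem's clampIdx
    have hc1 : (pvClamp sp.1 L).toNat = PySem.List.clampIdx out.length sp.1 := by
      rw [hL]; exact pvClamp_toNat sp.1 out.length
    have hc2 : (pvClamp sp.2.1 L).toNat = PySem.List.clampIdx out.length sp.2.1 := by
      rw [hL]; exact pvClamp_toNat sp.2.1 out.length
    have hreplwf : pvWf (pvRepl tm ms sp.2.2, 0, ((pvRepl tm ms sp.2.2).length : Int)) :=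
      pvWf_mk _ _ _ (le_refl 0) (by positivity) (le_refl _)
    have hreplval : pvVal (pvRepl tm ms sp.2.2, 0, ((pvRepl tm ms sp.2.2).length : Int)) =
        pvRepl tm ms sp.2.2 := by
      rw [pvVal_eq _ hreplwf]
      simp
    -- new pieces flatten to the new string
    have hnewflat :
        (((pvPrefix ps (pvClamp sp.1 L) ++
            [(pvRepl tm ms sp.2.2, 0, ((pvRepl tm ms sp.2.2).length : Int))] ++
            pvSuffix ps (pvClamp sp.2.1 L)).map pvVal).flatten)
          = PySem.List.slice out none (some sp.1) ++ pvRepl tm ms sp.2.2 ++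
              PySem.List.slice out (some sp.2.1) none := by
      rw [pv_slice_none_some out sp.1, PySem.List.slice_some_none out sp.2.1]
      simp only [List.map_append, List.flatten_append, List.map_cons, List.map_nil,
        List.flatten_cons, List.flatten_nil, List.append_nil]
      rw [pvPrefix_flatten ps _ hwf, pvSuffix_flatten ps _ hwf, hflat, hreplval, hc1, hc2]
    have hnewwf : ∀ q ∈ (pvPrefix ps (pvClamp sp.1 L) ++
        [(pvRepl tm ms sp.2.2, 0, ((pvRepl tm ms sp.2.2).length : Int))] ++
        pvSuffix ps (pvClamp sp.2.1 L)), pvWf q := by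
      intro q hq
      simp only [List.mem_append, List.mem_singleton] at hq
      rcases hq with (hq | hq) | hq
      · exact pvPrefix_wf ps _ hwf q hq
      · subst hq; exact hreplwf
      · exact pvSuffix_wf ps _ hwf q hq
    have hnewL : pvClamp sp.1 L + ((pvRepl tm ms sp.2.2).length : Int) +
        (L - pvClamp sp.2.1 L)
        = ((PySem.List.slice out none (some sp.1) ++ pvRepl tm ms sp.2.2 ++
            PySem.List.slice out (some sp.2.1) none).length : Int) := by
      have e1 : (PySem.List.slice out none (some sp.1)).length =
          PySem.List.clampIdx out.length sp.1 := by
        rw [pv_slice_none_some]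
        simp [List.length_take]
      have e2 : (PySem.List.slice out (some sp.2.1) none).length =
          out.length - PySem.List.clampIdx out.length sp.2.1 := by
        rw [PySem.List.slice_some_none]
        simp [List.length_drop]
      have b1 := PySem.List.clampIdx_le out.length sp.1
      have b2 := PySem.List.clampIdx_le out.length sp.2.1
      have n1 := pvClamp_nonneg sp.1 L hL0
      have n2 := pvClamp_nonneg sp.2.1 L hL0
      simp only [List.length_append, e1, e2]
      omega
    exact ih _ _ _ hnewwf hnewflat hnewL

-- ===== VERDICT (by name: the statement is the Claim_ definition above) =====
theorem apply_spans_py_spec : Claim_equal_apply_spans_py := by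
  intro text spans tag_map masking_strategy _hdom
  unfold Spec_apply_spans_py
  by_cases hnil : spans = []
  · simp [apply_spans_py, apply_spans_py_alt, hnil]
  · unfold apply_spans_py apply_spans_py_alt
    simp only [if_neg hnil]
    rw [PySem.List.foldl_prod_mk
      (f := fun (o : List Char) (sp : Int × Int × String) =>
        PySem.List.slice o none (some sp.1) ++ pvRepl tag_map masking_strategy sp.2.2 ++
          PySem.List.slice o (some sp.2.1) none)
      (g := fun (d : PySem.Dict String Int) (sp : Int × Int × String) =>
        d.insert sp.2.2 (d.getD sp.2.2 0 + 1))]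
    rw [PySem.List.foldl_prod_mk
      (f := fun (st : List (List Char × Int × Int) × Int) (sp : Int × Int × String) =>
        (pvPrefix st.1 (pvClamp sp.1 st.2) ++
          [(pvRepl tag_map masking_strategy sp.2.2, 0,
            ((pvRepl tag_map masking_strategy sp.2.2).length : Int))] ++
          pvSuffix st.1 (pvClamp sp.2.1 st.2),
         pvClamp sp.1 st.2 + ((pvRepl tag_map masking_strategy sp.2.2).length : Int) +
           (st.2 - pvClamp sp.2.1 st.2)))
      (g := fun (d : PySem.Dict String Int) (sp : Int × Int × String) =>
        d.insert sp.2.2 (d.getD sp.2.2 0 + 1))]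
    have hwf0 : ∀ p ∈ [((text.toList, 0, (text.toList.length : Int)) : List Char × Int × Int)],
        pvWf p := by
      intro p hp
      simp at hp
      subst hp
      exact pvWf_mk _ _ _ (le_refl 0) (by positivity) (le_refl _)
    have hflat0 : (([((text.toList, 0, (text.toList.length : Int)) :
        List Char × Int × Int)].map pvVal).flatten) = text.toList := by
      simp only [List.map_cons, List.map_nil, List.flatten_cons, List.flatten_nil,
        List.append_nil]
      rw [pvVal_mk _ _ _ (le_refl 0) (by positivity) (le_refl _)]
      simp
    have h := pv_fold_inv tag_map masking_strategy
      (PySem.List.sorted spans (fun x => x.1) true) text.toList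
      [(text.toList, 0, (text.toList.length : Int))] (text.toList.length : Int)
      hwf0 hflat0 (by simp)
    rw [Prod.mk.injEq]
    constructor
    · exact congrArg String.ofList h.2.symm
    · rfl
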